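-- pv_equiv track=rewrite | github.com/gauravfs-14/crash-www26 | utils/visualize.py | _severity_proxy
-- ===== SOURCE A (Python) =====
-- def _severity_proxy(outcome: str) -> str:
--     """Determine severity based on actual outcome patterns in the data."""
--     o = outcome.lower()
--     if any(k in o for k in ['fatal', 'death', 'killed', 'died']):
--         return 'Fatal'
--     elif any(k in o for k in ['injury', 'injured', 'hurt', 'wounded', 'medical', 'hospital', 'treatment']):
--         return 'Injury'
--     elif any(k in o for k in ['damage', 'damaged', 'property', 'disabled', 'collision', 'struck', 'hit', 'collided']):
--         return 'Property_Damage'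
--     else:
--         return 'Minor'
-- ===== SOURCE B (Python) =====
-- _KW_RANK = {
--     'fatal': 3, 'death': 3, 'killed': 3, 'died': 3,
--     'injury': 2, 'injured': 2, 'hurt': 2, 'wounded': 2,
--     'medical': 2, 'hospital': 2, 'treatment': 2,
--     'damage': 1, 'damaged': 1, 'property': 1, 'disabled': 1,
--     'collision': 1, 'struck': 1, 'hit': 1, 'collided': 1,
-- }
-- _LABELS = ['Minor', 'Property_Damage', 'Injury', 'Fatal']
--
--
-- def _severity_proxy(outcome: str) -> str:
--     """Single left-to-right positional scan: accumulate the maximum severity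
--     rank of any keyword matching at any position, then map rank -> label."""
--     o = outcome.lower()
--     best = 0
--     for i in range(len(o)):
--         for k, r in _KW_RANK.items():
--             if o.startswith(k, i):
--                 best = max(best, r)
--     return _LABELS[best]
-- ===== Notes on version B (the rewrite author's own statement) =====
-- stated objective: alternative
-- what changed: Instead of A's three staged any-substring tests in priority order, B makes one left-to-right scan over string positions, accumulating the maximum severity rank of any keyword that matches at each position, and maps the final rank to its label.
import Mathlib
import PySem

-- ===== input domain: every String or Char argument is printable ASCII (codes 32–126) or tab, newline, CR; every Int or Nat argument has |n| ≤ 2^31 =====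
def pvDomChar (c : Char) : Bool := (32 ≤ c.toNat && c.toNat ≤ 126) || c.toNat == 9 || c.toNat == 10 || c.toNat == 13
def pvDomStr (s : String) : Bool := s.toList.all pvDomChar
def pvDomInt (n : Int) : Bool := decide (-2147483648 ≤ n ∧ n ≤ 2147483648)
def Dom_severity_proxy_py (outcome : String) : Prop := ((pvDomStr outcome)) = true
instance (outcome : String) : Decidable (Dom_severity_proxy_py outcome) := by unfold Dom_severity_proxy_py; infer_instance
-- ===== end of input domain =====

-- B replaces A's three staged any-substring tests by ONE positional scan that
-- accumulates the maximum severity rank of any keyword matching at any position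
-- (objective: alternative, same asymptotic cost).

-- ===== PORT A =====
def severity_proxy_py (outcome : String) : String :=
  let o := PySem.Str.lower outcome
  if ["fatal", "death", "killed", "died"].any (fun k => PySem.Str.isIn k o) then
    "Fatal"
  else if ["injury", "injured", "hurt", "wounded", "medical", "hospital", "treatment"].any
      (fun k => PySem.Str.isIn k o) then
    "Injury"
  else if ["damage", "damaged", "property", "disabled", "collision", "struck", "hit", "collided"].any
      (fun k => PySem.Str.isIn k o) then
    "Property_Damage"
  else
    "Minor"

-- ===== PORT B =====
-- _KW_RANK (a dict iterated in insertion order) as an association list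
def sevRanks : List (List Char × Nat) :=
  [("fatal".toList, 3), ("death".toList, 3), ("killed".toList, 3), ("died".toList, 3),
   ("injury".toList, 2), ("injured".toList, 2), ("hurt".toList, 2), ("wounded".toList, 2),
   ("medical".toList, 2), ("hospital".toList, 2), ("treatment".toList, 2),
   ("damage".toList, 1), ("damaged".toList, 1), ("property".toList, 1), ("disabled".toList, 1),
   ("collision".toList, 1), ("struck".toList, 1), ("hit".toList, 1), ("collided".toList, 1)]

def sevLabels : List String := ["Minor", "Property_Damage", "Injury", "Fatal"]

-- o.startswith(k, i) with 0 ≤ i is exactly: k is a prefix of o[i:] (here Chars.startswith on o.drop i)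
def severity_proxy_py_alt (outcome : String) : String :=
  let o := (PySem.Str.lower outcome).toList
  let best := (PySem.List.pyRange 0 (o.length : Int) 1).foldl
    (fun b i => sevRanks.foldl
      (fun b' kr => if PySem.Chars.startswith (o.drop i.toNat) kr.1 then max b' kr.2 else b') b) 0
  -- _LABELS[best]: best ≤ 3 always, so plain in-range indexing; getD's default is never used
  sevLabels.getD best "Minor"

-- ===== PRECONDITION & SPEC =====
def Spec_severity_proxy_py (outcome : String) (out : String) : Prop := out = severity_proxy_py_alt outcome
instance (outcome : String) (out : String) : Decidable (Spec_severity_proxy_py outcome out) := by unfold Spec_severity_proxy_py; infer_instance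

-- ===== CLAIM (what is proved, stated in full; the proofs are below) =====
def Claim_equal_severity_proxy_py : Prop := ∀ (outcome : String), Dom_severity_proxy_py outcome → Spec_severity_proxy_py outcome (severity_proxy_py outcome)

-- ===== LEMMAS AND PROOFS =====

-- the accumulated best rank computed by B's scan over o
def bestOf (o : List Char) : Nat :=
  (PySem.List.pyRange 0 (o.length : Int) 1).foldl
    (fun b i => sevRanks.foldl
      (fun b' kr => if PySem.Chars.startswith (o.drop i.toNat) kr.1 then max b' kr.2 else b') b) 0

theorem alt_eq_bestOf (outcome : String) :
    severity_proxy_py_alt outcome = sevLabels.getD (bestOf (PySem.Str.lower outcome).toList) "Minor" := rfl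

theorem inner_mono (s : List Char) (l : List (List Char × Nat)) (b : Nat) :
    b ≤ l.foldl (fun b' kr => if PySem.Chars.startswith s kr.1 then max b' kr.2 else b') b := by
  induction l generalizing b with
  | nil => exact le_refl b
  | cons p t ih =>
      refine le_trans ?_ (ih _)
      dsimp only; split <;> omega

theorem inner_ge (s : List Char) (l : List (List Char × Nat)) (k : List Char) (r : Nat)
    (hm : (k, r) ∈ l) (hp : PySem.Chars.startswith s k = true) (b : Nat) :
    r ≤ l.foldl (fun b' kr => if PySem.Chars.startswith s kr.1 then max b' kr.2 else b') b := by
  induction l generalizing b with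
  | nil => cases hm
  | cons p t ih =>
      rcases List.mem_cons.mp hm with h | h
      · subst h
        refine le_trans ?_ (inner_mono s t _)
        dsimp only; rw [hp]; simp
      · exact ih h _

theorem inner_le (s : List Char) (l : List (List Char × Nat)) (m : Nat)
    (h : ∀ p ∈ l, PySem.Chars.startswith s p.1 = true → p.2 ≤ m) (b : Nat) (hb : b ≤ m) :
    l.foldl (fun b' kr => if PySem.Chars.startswith s kr.1 then max b' kr.2 else b') b ≤ m := by
  induction l generalizing b with
  | nil => exact hb
  | cons p t ih =>
      refine ih (fun q hq => h q (List.mem_cons_of_mem _ hq)) _ ?_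
      dsimp only; split
      · have := h p (List.mem_cons_self) ‹_›; omega
      · exact hb

theorem outer_mono (o : List Char) (xs : List Int) (b : Nat) :
    b ≤ xs.foldl (fun b i => sevRanks.foldl
      (fun b' kr => if PySem.Chars.startswith (o.drop i.toNat) kr.1 then max b' kr.2 else b') b) b := by
  induction xs generalizing b with
  | nil => exact le_refl b
  | cons i t ih => exact le_trans (inner_mono _ _ _) (ih _)

theorem outer_ge (o : List Char) (xs : List Int) (i : Int) (hi : i ∈ xs)
    (k : List Char) (r : Nat) (hm : (k, r) ∈ sevRanks)
    (hp : PySem.Chars.startswith (o.drop i.toNat) k = true) (b : Nat) :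
    r ≤ xs.foldl (fun b i => sevRanks.foldl
      (fun b' kr => if PySem.Chars.startswith (o.drop i.toNat) kr.1 then max b' kr.2 else b') b) b := by
  induction xs generalizing b with
  | nil => cases hi
  | cons j t ih =>
      rcases List.mem_cons.mp hi with h | h
      · subst h
        exact le_trans (inner_ge _ _ _ _ hm hp _) (outer_mono o t _)
      · exact ih h _

theorem outer_le (o : List Char) (xs : List Int) (m : Nat)
    (h : ∀ i ∈ xs, ∀ p ∈ sevRanks, PySem.Chars.startswith (o.drop i.toNat) p.1 = true → p.2 ≤ m)
    (b : Nat) (hb : b ≤ m) :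
    xs.foldl (fun b i => sevRanks.foldl
      (fun b' kr => if PySem.Chars.startswith (o.drop i.toNat) kr.1 then max b' kr.2 else b') b) b ≤ m := by
  induction xs generalizing b with
  | nil => exact hb
  | cons j t ih =>
      exact ih (fun i hi => h i (List.mem_cons_of_mem _ hi)) _
        (inner_le _ _ _ (h j List.mem_cons_self) _ hb)

theorem sevRanks_rank_le (p : List Char × Nat) (hp : p ∈ sevRanks) : p.2 ≤ 3 := by
  fin_cases hp <;> decide

theorem sevRanks_ne_nil (p : List Char × Nat) (hp : p ∈ sevRanks) : p.1 ≠ [] := by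
  fin_cases hp <;> decide

theorem bestOf_le_three (o : List Char) : bestOf o ≤ 3 :=
  outer_le o _ 3 (fun _ _ p hp _ => sevRanks_rank_le p hp) 0 (by omega)

theorem bestOf_ge_iff (o : List Char) (r : Nat) (hr : 1 ≤ r) :
    r ≤ bestOf o ↔ ∃ p ∈ sevRanks, r ≤ p.2 ∧ PySem.Chars.isIn p.1 o = true := by
  constructor
  · intro hbest
    by_contra hno
    push Not at hno
    have : bestOf o ≤ r - 1 := by
      refine outer_le o _ (r - 1) ?_ 0 (by omega)
      intro i _ p hp hs
      have hpre : p.1 <+: o.drop i.toNat := (PySem.Chars.startswith_iff _ _).mp hs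
      have hin : PySem.Chars.isIn p.1 o = true :=
        (PySem.Chars.exists_prefix_drop_iff_isIn _ _).mp ⟨i.toNat, hpre⟩
      have := hno p hp
      rcases Nat.lt_or_ge p.2 r with h | h
      · omega
      · exact absurd hin (by simpa using this h)
    omega
  · rintro ⟨p, hp, hrp, hin⟩
    obtain ⟨j, hpre⟩ := (PySem.Chars.exists_prefix_drop_iff_isIn p.1 o).mpr hin
    have hne := sevRanks_ne_nil p hp
    have hjlt : j < o.length := by
      by_contra hge
      have : o.drop j = [] := List.drop_eq_nil_iff.mpr (by omega)
      rw [this] at hpre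
      exact hne (List.prefix_nil.mp hpre)
    have hmem : (j : Int) ∈ PySem.List.pyRange 0 (o.length : Int) 1 := by
      rw [PySem.List.mem_pyRange_one]
      constructor <;> [positivity; exact_mod_cast hjlt]
    have hs : PySem.Chars.startswith (o.drop ((j : Int)).toNat) p.1 = true := by
      rw [Int.toNat_natCast]
      exact (PySem.Chars.startswith_iff _ _).mpr hpre
    have hg := outer_ge o _ (j : Int) hmem p.1 p.2 (by simpa using hp) hs 0
    unfold bestOf
    omega

-- the ∃-over-sevRanks conditions coincide with A's per-tier `any` tests
theorem tier3_iff (o : String) :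
    (∃ p ∈ sevRanks, 3 ≤ p.2 ∧ PySem.Chars.isIn p.1 o.toList = true) ↔
    ((["fatal", "death", "killed", "died"].any (fun k => PySem.Str.isIn k o)) = true) := by
  simp only [List.any_cons, List.any_nil, Bool.or_eq_true, PySem.Str.isIn_eq]
  constructor
  · rintro ⟨p, hp, hge, hin⟩
    simp only [sevRanks, List.mem_cons, List.not_mem_nil, or_false] at hp
    rcases hp with rfl|rfl|rfl|rfl|rfl|rfl|rfl|rfl|rfl|rfl|rfl|rfl|rfl|rfl|rfl|rfl|rfl|rfl|rfl <;> simp_all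
  · rintro (h|h|h|h|h)
    · exact ⟨("fatal".toList, 3), by simp [sevRanks], by norm_num, h⟩
    · exact ⟨("death".toList, 3), by simp [sevRanks], by norm_num, h⟩
    · exact ⟨("killed".toList, 3), by simp [sevRanks], by norm_num, h⟩
    · exact ⟨("died".toList, 3), by simp [sevRanks], by norm_num, h⟩
    · exact Bool.noConfusion h

theorem tier2_iff (o : String) :
    (∃ p ∈ sevRanks, 2 ≤ p.2 ∧ PySem.Chars.isIn p.1 o.toList = true) ↔
    ((["fatal", "death", "killed", "died"].any (fun k => PySem.Str.isIn k o)) = true ∨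
     (["injury", "injured", "hurt", "wounded", "medical", "hospital", "treatment"].any (fun k => PySem.Str.isIn k o)) = true) := by
  simp only [List.any_cons, List.any_nil, Bool.or_eq_true, PySem.Str.isIn_eq]
  constructor
  · rintro ⟨p, hp, hge, hin⟩
    simp only [sevRanks, List.mem_cons, List.not_mem_nil, or_false] at hp
    rcases hp with rfl|rfl|rfl|rfl|rfl|rfl|rfl|rfl|rfl|rfl|rfl|rfl|rfl|rfl|rfl|rfl|rfl|rfl|rfl <;> simp_all
  · rintro ((h|h|h|h|h)|(h|h|h|h|h|h|h|h))
    · exact ⟨("fatal".toList, 3), by simp [sevRanks], by norm_num, h⟩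
    · exact ⟨("death".toList, 3), by simp [sevRanks], by norm_num, h⟩
    · exact ⟨("killed".toList, 3), by simp [sevRanks], by norm_num, h⟩
    · exact ⟨("died".toList, 3), by simp [sevRanks], by norm_num, h⟩
    · exact Bool.noConfusion h
    · exact ⟨("injury".toList, 2), by simp [sevRanks], by norm_num, h⟩
    · exact ⟨("injured".toList, 2), by simp [sevRanks], by norm_num, h⟩
    · exact ⟨("hurt".toList, 2), by simp [sevRanks], by norm_num, h⟩
    · exact ⟨("wounded".toList, 2), by simp [sevRanks], by norm_num, h⟩
    · exact ⟨("medical".toList, 2), by simp [sevRanks], by norm_num, h⟩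
    · exact ⟨("hospital".toList, 2), by simp [sevRanks], by norm_num, h⟩
    · exact ⟨("treatment".toList, 2), by simp [sevRanks], by norm_num, h⟩
    · exact Bool.noConfusion h

theorem tier1_iff (o : String) :
    (∃ p ∈ sevRanks, 1 ≤ p.2 ∧ PySem.Chars.isIn p.1 o.toList = true) ↔
    ((["fatal", "death", "killed", "died"].any (fun k => PySem.Str.isIn k o)) = true ∨
     (["injury", "injured", "hurt", "wounded", "medical", "hospital", "treatment"].any (fun k => PySem.Str.isIn k o)) = true ∨
     (["damage", "damaged", "property", "disabled", "collision", "struck", "hit", "collided"].any (fun k => PySem.Str.isIn k o)) = true) := by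
  simp only [List.any_cons, List.any_nil, Bool.or_eq_true, PySem.Str.isIn_eq]
  constructor
  · rintro ⟨p, hp, hge, hin⟩
    simp only [sevRanks, List.mem_cons, List.not_mem_nil, or_false] at hp
    rcases hp with rfl|rfl|rfl|rfl|rfl|rfl|rfl|rfl|rfl|rfl|rfl|rfl|rfl|rfl|rfl|rfl|rfl|rfl|rfl <;> simp_all
  · rintro ((h|h|h|h|h)|(h|h|h|h|h|h|h|h)|(h|h|h|h|h|h|h|h|h))
    · exact ⟨("fatal".toList, 3), by simp [sevRanks], by norm_num, h⟩
    · exact ⟨("death".toList, 3), by simp [sevRanks], by norm_num, h⟩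
    · exact ⟨("killed".toList, 3), by simp [sevRanks], by norm_num, h⟩
    · exact ⟨("died".toList, 3), by simp [sevRanks], by norm_num, h⟩
    · exact Bool.noConfusion h
    · exact ⟨("injury".toList, 2), by simp [sevRanks], by norm_num, h⟩
    · exact ⟨("injured".toList, 2), by simp [sevRanks], by norm_num, h⟩
    · exact ⟨("hurt".toList, 2), by simp [sevRanks], by norm_num, h⟩
    · exact ⟨("wounded".toList, 2), by simp [sevRanks], by norm_num, h⟩
    · exact ⟨("medical".toList, 2), by simp [sevRanks], by norm_num, h⟩
    · exact ⟨("hospital".toList, 2), by simp [sevRanks], by norm_num, h⟩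
    · exact ⟨("treatment".toList, 2), by simp [sevRanks], by norm_num, h⟩
    · exact Bool.noConfusion h
    · exact ⟨("damage".toList, 1), by simp [sevRanks], by norm_num, h⟩
    · exact ⟨("damaged".toList, 1), by simp [sevRanks], by norm_num, h⟩
    · exact ⟨("property".toList, 1), by simp [sevRanks], by norm_num, h⟩
    · exact ⟨("disabled".toList, 1), by simp [sevRanks], by norm_num, h⟩
    · exact ⟨("collision".toList, 1), by simp [sevRanks], by norm_num, h⟩
    · exact ⟨("struck".toList, 1), by simp [sevRanks], by norm_num, h⟩
    · exact ⟨("hit".toList, 1), by simp [sevRanks], by norm_num, h⟩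
    · exact ⟨("collided".toList, 1), by simp [sevRanks], by norm_num, h⟩
    · exact Bool.noConfusion h

-- ===== VERDICT (by name: the statement is the Claim_ definition above) =====
theorem severity_proxy_py_spec : Claim_equal_severity_proxy_py := by
  intro outcome _
  unfold Spec_severity_proxy_py
  rw [alt_eq_bestOf]
  set o := PySem.Str.lower outcome with ho
  unfold severity_proxy_py
  rw [← ho]
  by_cases h3 : (["fatal", "death", "killed", "died"].any (fun k => PySem.Str.isIn k o)) = true
  · have hge : 3 ≤ bestOf o.toList := (bestOf_ge_iff _ 3 (by omega)).mpr ((tier3_iff o).mpr h3)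
    have hle := bestOf_le_three o.toList
    have : bestOf o.toList = 3 := by omega
    rw [this, if_pos h3]
    rfl
  · by_cases h2 : (["injury", "injured", "hurt", "wounded", "medical", "hospital", "treatment"].any
        (fun k => PySem.Str.isIn k o)) = true
    · have hge : 2 ≤ bestOf o.toList := (bestOf_ge_iff _ 2 (by omega)).mpr ((tier2_iff o).mpr (Or.inr h2))
      have hlt : ¬ 3 ≤ bestOf o.toList := by
        intro hc
        exact h3 ((tier3_iff o).mp ((bestOf_ge_iff _ 3 (by omega)).mp hc))
      have : bestOf o.toList = 2 := by omega
      rw [this, if_neg h3, if_pos h2]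
      rfl
    · by_cases h1 : (["damage", "damaged", "property", "disabled", "collision", "struck", "hit", "collided"].any
          (fun k => PySem.Str.isIn k o)) = true
      · have hge : 1 ≤ bestOf o.toList :=
          (bestOf_ge_iff _ 1 (by omega)).mpr ((tier1_iff o).mpr (Or.inr (Or.inr h1)))
        have hlt : ¬ 2 ≤ bestOf o.toList := by
          intro hc
          rcases (tier2_iff o).mp ((bestOf_ge_iff _ 2 (by omega)).mp hc) with h | h
          · exact h3 h
          · exact h2 h
        have : bestOf o.toList = 1 := by omega
        rw [this, if_neg h3, if_neg h2, if_pos h1]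
        rfl
      · have hlt : ¬ 1 ≤ bestOf o.toList := by
          intro hc
          rcases (tier1_iff o).mp ((bestOf_ge_iff _ 1 (by omega)).mp hc) with h | h | h
          · exact h3 h
          · exact h2 h
          · exact h1 h
        have : bestOf o.toList = 0 := by omega
        rw [this, if_neg h3, if_neg h2, if_neg h1]
        rfl
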